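-- pv_equiv track=rewrite | github.com/jameschoi112/weverse_signup_automation | src/services/email_generator.py | _pattern_middle_heavy
-- ===== SOURCE A (Python) =====
-- from typing import Set, List
--
-- def _pattern_middle_heavy(chars: List[str]) -> str:
--     """중간에 많은 dot"""
--     result = []
--     length = len(chars)
--     start = length // 3
--     end = 2 * length // 3
--     for i, char in enumerate(chars):
--         result.append(char)
--         if start <= i < end and i < len(chars) - 1:
--             result.append('.')
--     return ''.join(result)
-- ===== SOURCE B (Python) =====
-- def _pattern_middle_heavy(chars):
--     """중간에 많은 dot"""
--     length = len(chars)
--     start = length // 3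
--     end = 2 * length // 3
--     return ''.join(chars[:start]) + '.'.join(chars[start:end + 1]) + ''.join(chars[end + 1:])
-- ===== Notes on version B (the rewrite author's own statement) =====
-- stated objective: simpler
-- what changed: Replaces the per-element loop with an index-and-branch by a closed-form three-slice decomposition: plain-join the prefix, '.'-join the middle slice chars[start:end+1], plain-join the suffix.
import Mathlib
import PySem

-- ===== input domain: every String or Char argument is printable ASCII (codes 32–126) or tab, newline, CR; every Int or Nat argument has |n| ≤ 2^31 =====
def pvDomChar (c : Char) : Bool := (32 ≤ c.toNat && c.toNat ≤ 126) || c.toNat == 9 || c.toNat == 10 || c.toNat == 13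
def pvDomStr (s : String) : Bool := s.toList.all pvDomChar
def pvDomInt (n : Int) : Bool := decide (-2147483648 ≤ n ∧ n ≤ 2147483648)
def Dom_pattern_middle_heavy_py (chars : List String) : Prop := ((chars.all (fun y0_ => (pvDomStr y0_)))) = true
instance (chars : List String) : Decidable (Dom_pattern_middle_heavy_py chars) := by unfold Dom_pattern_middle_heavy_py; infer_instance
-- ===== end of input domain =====

-- B replaces A's indexed per-element loop by a closed-form three-slice decomposition
-- (plain-join prefix, '.'-join of chars[start:end+1], plain-join suffix): simpler, same cost.

-- ===== PORT A =====
def pattern_middle_heavy_py (chars : List String) : String :=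
  -- result = []; length = len(chars); start = length // 3; end = 2 * length // 3
  let length : Int := (chars.length : Int)
  let start : Int := PySem.Int.floordiv length 3
  let «end» : Int := PySem.Int.floordiv (2 * length) 3
  -- for i, char in enumerate(chars): result.append(char); if start <= i < end and i < len(chars) - 1: result.append('.')
  let result : List String :=
    (PySem.List.enumerate chars).foldl
      (fun acc p =>
        let acc' := acc ++ [p.2]
        if start ≤ p.1 ∧ p.1 < «end» ∧ p.1 < length - 1 then acc' ++ ["."] else acc')
      []
  -- return ''.join(result)
  PySem.Str.join "" result

-- ===== PORT B =====
def pattern_middle_heavy_py_alt (chars : List String) : String :=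
  let length : Int := (chars.length : Int)
  let start : Int := PySem.Int.floordiv length 3
  let «end» : Int := PySem.Int.floordiv (2 * length) 3
  PySem.Str.join "" (PySem.List.slice chars none (some start))
    ++ PySem.Str.join "." (PySem.List.slice chars (some start) (some («end» + 1)))
    ++ PySem.Str.join "" (PySem.List.slice chars (some («end» + 1)) none)

-- ===== PRECONDITION & SPEC =====
def Spec_pattern_middle_heavy_py (chars : List String) (out : String) : Prop := out = pattern_middle_heavy_py_alt chars
instance (chars : List String) (out : String) : Decidable (Spec_pattern_middle_heavy_py chars out) := by unfold Spec_pattern_middle_heavy_py; infer_instance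

-- ===== CLAIM (what is proved, stated in full; the proofs are below) =====
def Claim_equal_pattern_middle_heavy_py : Prop := ∀ (chars : List String), Dom_pattern_middle_heavy_py chars → Spec_pattern_middle_heavy_py chars (pattern_middle_heavy_py chars)

-- ===== LEMMAS AND PROOFS =====

/-- The per-element output of A's loop, as a recursive function of the index counter. -/
def pvInterC (cond : Int → Prop) [DecidablePred cond] : List String → Int → List String
  | [], _ => []
  | x :: t, k => if cond k then x :: "." :: pvInterC cond t (k + 1) else x :: pvInterC cond t (k + 1)

/-- `ys` with a dot inserted after each of its first `d` elements. -/
def pvAddDots : Nat → List String → List String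
  | 0, ys => ys
  | _ + 1, [] => []
  | d + 1, y :: t => y :: "." :: pvAddDots d t

lemma pvFoldA (cond : Int → Prop) [DecidablePred cond] :
    ∀ (xs : List String) (k : Int) (acc : List String),
      (PySem.List.enumerate xs k).foldl
        (fun acc p => if cond p.1 then acc ++ [p.2] ++ ["."] else acc ++ [p.2]) acc
      = acc ++ pvInterC cond xs k := by
  intro xs
  induction xs with
  | nil => intro k acc; simp [PySem.List.enumerate, pvInterC]
  | cons x t ih =>
    intro k acc
    rw [PySem.List.enumerate_cons, List.foldl_cons, ih]
    by_cases h : cond k <;> simp [pvInterC, h]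

lemma pvInterC_congr (c1 c2 : Int → Prop) [DecidablePred c1] [DecidablePred c2]
    (h : ∀ i, c1 i ↔ c2 i) : ∀ (xs : List String) (k : Int), pvInterC c1 xs k = pvInterC c2 xs k := by
  intro xs
  induction xs with
  | nil => intro k; rfl
  | cons x t ih =>
    intro k
    simp only [pvInterC, h k, ih]

lemma pvInterC_ge (s e : Nat) (xs : List String) :
    ∀ k : Nat, e ≤ k →
      pvInterC (fun i => (s : Int) ≤ i ∧ i < (e : Int)) xs (k : Int) = xs := by
  induction xs with
  | nil => intro k _; rfl
  | cons x t ih =>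
    intro k hk
    have hc : ¬ ((s : Int) ≤ (k : Int) ∧ (k : Int) < (e : Int)) := by
      rintro ⟨_, h2⟩
      have : (e : Int) ≤ (k : Int) := by exact_mod_cast hk
      omega
    have : ((k : Int) + 1) = ((k + 1 : Nat) : Int) := by push_cast; ring
    simp only [pvInterC, if_neg hc, this, ih (k + 1) (Nat.le_succ_of_le hk)]

lemma pvInterC_mid (s e : Nat) (xs : List String) :
    ∀ k : Nat, s ≤ k →
      pvInterC (fun i => (s : Int) ≤ i ∧ i < (e : Int)) xs (k : Int) = pvAddDots (e - k) xs := by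
  induction xs with
  | nil => intro k _; cases h : e - k <;> rfl
  | cons x t ih =>
    intro k hk
    have hcast : ((k : Int) + 1) = ((k + 1 : Nat) : Int) := by push_cast; ring
    by_cases hke : k < e
    · have hc : (s : Int) ≤ (k : Int) ∧ (k : Int) < (e : Int) := ⟨by exact_mod_cast hk, by exact_mod_cast hke⟩
      have hek : e - k = (e - (k + 1)) + 1 := by omega
      simp only [pvInterC, if_pos hc, hcast, ih (k + 1) (Nat.le_succ_of_le hk), hek, pvAddDots]
    · have hc : ¬ ((s : Int) ≤ (k : Int) ∧ (k : Int) < (e : Int)) := by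
        rintro ⟨_, h2⟩
        have : (e : Int) ≤ (k : Int) := by exact_mod_cast Nat.not_lt.mp hke
        omega
      have hek : e - k = 0 := by omega
      rw [hek]
      simp only [pvInterC, if_neg hc, hcast, pvAddDots]
      rw [pvInterC_ge s e t (k + 1) (by omega)]

lemma pvInterC_lo (s e : Nat) (xs : List String) :
    ∀ k : Nat, k ≤ s →
      pvInterC (fun i => (s : Int) ≤ i ∧ i < (e : Int)) xs (k : Int)
        = xs.take (s - k) ++ pvAddDots (e - s) (xs.drop (s - k)) := by
  induction xs with
  | nil => intro k _; cases e - s <;> simp [pvInterC, pvAddDots]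
  | cons x t ih =>
    intro k hk
    have hcast : ((k : Int) + 1) = ((k + 1 : Nat) : Int) := by push_cast; ring
    by_cases hks : k < s
    · have hc : ¬ ((s : Int) ≤ (k : Int) ∧ (k : Int) < (e : Int)) := by
        rintro ⟨h1, _⟩
        have : (k : Int) < (s : Int) := by exact_mod_cast hks
        omega
      have hsk : s - k = (s - (k + 1)) + 1 := by omega
      simp only [pvInterC, if_neg hc, hcast, ih (k + 1) (by omega), hsk,
        List.take_succ_cons, List.drop_succ_cons, List.cons_append]
    · have hks' : k = s := by omega
      rw [hks', pvInterC_mid s e (x :: t) s (le_refl s)]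
      simp

/-- `''.join` at the char level: concatenation of the pieces. -/
lemma pvJoinNil_cons (c : List Char) (rest : List (List Char)) :
    PySem.Chars.join [] (c :: rest) = c ++ PySem.Chars.join [] rest := by
  cases rest with
  | nil => simp [PySem.Chars.join_singleton, PySem.Chars.join_nil]
  | cons q r => rw [PySem.Chars.join_cons_cons]; simp

lemma pvJoinNil_append (a b : List (List Char)) :
    PySem.Chars.join [] (a ++ b) = PySem.Chars.join [] a ++ PySem.Chars.join [] b := by
  induction a with
  | nil => simp [PySem.Chars.join_nil]
  | cons x t ih => simp [pvJoinNil_cons, ih]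

lemma pvJoinNil_addDots (d : Nat) :
    ∀ ys : List String, d < ys.length →
      PySem.Chars.join [] ((pvAddDots d ys).map String.toList)
        = PySem.Chars.join ['.'] ((ys.take (d + 1)).map String.toList)
          ++ PySem.Chars.join [] ((ys.drop (d + 1)).map String.toList) := by
  induction d with
  | zero =>
    intro ys hy
    cases ys with
    | nil => simp at hy
    | cons y t =>
      simp only [pvAddDots, List.take_succ_cons, List.take_zero, List.drop_succ_cons,
        List.drop_zero, List.map_cons, List.map_nil, PySem.Chars.join_singleton]
      rw [pvJoinNil_cons]
  | succ d ih =>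
    intro ys hy
    cases ys with
    | nil => simp at hy
    | cons y t =>
      have ht : d < t.length := by simpa using hy
      have htne : t.take (d + 1) ≠ [] := by
        cases t with
        | nil => simp at ht
        | cons a b => simp
      simp only [pvAddDots, List.map_cons]
      rw [pvJoinNil_cons, pvJoinNil_cons, ih t ht]
      obtain ⟨a, r, har⟩ : ∃ a r, t.take (d + 1) = a :: r := by
        cases h : t.take (d + 1) with
        | nil => exact absurd h htne
        | cons a r => exact ⟨a, r, rfl⟩
      rw [List.take_succ_cons, List.drop_succ_cons, har]
      simp [List.map_cons, PySem.Chars.join_cons_cons]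

lemma pvString_eq_of_toList (a b : String) (h : a.toList = b.toList) : a = b := by
  have := congrArg String.ofList h
  simpa using this

theorem pvMain (chars : List String) :
    pattern_middle_heavy_py chars = pattern_middle_heavy_py_alt chars := by
  cases hc : chars with
  | nil => rfl
  | cons c0 ct =>
  rw [← hc]
  set n : Nat := chars.length with hn
  have hn1 : 1 ≤ n := by rw [hn, hc]; simp
  set s : Nat := n / 3 with hs
  set e : Nat := (2 * n) / 3 with he
  have hse : s ≤ e := by omega
  have hen : e < n := by omega
  -- the Int quantities of both ports are casts of s and e
  have hstart : PySem.Int.floordiv (chars.length : Int) 3 = (s : Int) := by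
    rw [hs, hn]; exact_mod_cast PySem.Int.floordiv_natCast chars.length 3
  have hend : PySem.Int.floordiv (2 * (chars.length : Int)) 3 = (e : Int) := by
    rw [he, hn]
    have : (2 * (chars.length : Int)) = ((2 * chars.length : Nat) : Int) := by push_cast; ring
    rw [this]
    exact_mod_cast PySem.Int.floordiv_natCast (2 * chars.length) 3
  apply pvString_eq_of_toList
  unfold pattern_middle_heavy_py pattern_middle_heavy_py_alt
  simp only [hstart, hend]
  rw [pvFoldA (fun i => (s : Int) ≤ i ∧ i < (e : Int) ∧ i < (chars.length : Int) - 1) chars 0 []]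
  rw [pvInterC_congr _ (fun i => (s : Int) ≤ i ∧ i < (e : Int))
    (by intro i; constructor
        · rintro ⟨h1, h2, _⟩; exact ⟨h1, h2⟩
        · rintro ⟨h1, h2⟩
          refine ⟨h1, h2, ?_⟩
          have : (e : Int) ≤ (chars.length : Int) - 1 := by
            rw [← hn]; exact_mod_cast (by omega : (e : Int) ≤ (n : Int) - 1)
          omega)]
  have h0 : ((0 : Int)) = ((0 : Nat) : Int) := by norm_num
  rw [h0, pvInterC_lo s e chars 0 (Nat.zero_le s)]
  -- slices of B
  have hslice1 : PySem.List.slice chars none (some (s : Int)) = chars.take s :=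
    PySem.List.slice_to_natCast chars s
  have hslice2 : PySem.List.slice chars (some (s : Int)) (some ((e : Int) + 1))
      = (chars.drop s).take (e + 1 - s) := by
    have : ((e : Int) + 1) = ((e + 1 : Nat) : Int) := by push_cast; ring
    rw [this, PySem.List.slice_natCast]
  have hslice3 : PySem.List.slice chars (some ((e : Int) + 1)) none = chars.drop (e + 1) := by
    have : ((e : Int) + 1) = ((e + 1 : Nat) : Int) := by push_cast; ring
    rw [this, PySem.List.slice_from_natCast]
  rw [hslice1, hslice2, hslice3]
  simp only [Nat.sub_zero, PySem.Str.toList_join, String.toList_append, List.map_append]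
  have hnilstr : "".toList = ([] : List Char) := rfl
  have hdotstr : ".".toList = ['.'] := rfl
  rw [hnilstr, hdotstr]
  simp only [List.map_nil, List.nil_append]
  rw [pvJoinNil_append]
  have hdlen : e - s < (chars.drop s).length := by
    rw [List.length_drop, ← hn]; omega
  rw [pvJoinNil_addDots (e - s) (chars.drop s) hdlen]
  have h1 : (chars.drop s).take ((e - s) + 1) = (chars.drop s).take (e + 1 - s) := by
    congr 1; omega
  have h2 : (chars.drop s).drop ((e - s) + 1) = chars.drop (e + 1) := by
    rw [List.drop_drop]; congr 1; omega
  rw [h1, h2, List.append_assoc]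

-- ===== VERDICT (by name: the statement is the Claim_ definition above) =====
theorem pattern_middle_heavy_py_spec : Claim_equal_pattern_middle_heavy_py := by
  intro chars _
  unfold Spec_pattern_middle_heavy_py
  exact pvMain chars
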